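-- pv_equiv track=rewrite | github.com/MouinulIslamNJIT/BallotChange | multiAttributesBallotChange.py | checkPortion
-- ===== SOURCE A (Python) =====
-- def checkPortion(newLc,newPortion):
--     Lcfreq = {}
--     for i in newLc:
--         Lcfreq.setdefault(i,0)
--         Lcfreq[i]+=1
--
--     for i in newPortion.keys():
--         if newPortion[i] > 0:
--             if i not in Lcfreq:
--                 return False
--             elif newPortion[i] > Lcfreq[i]:
--                 return False
--     return True
-- ===== SOURCE B (Python) =====
-- def checkPortion(newLc, newPortion):
--     remaining = {k: v for k, v in newPortion.items() if v > 0}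
--     for i in newLc:
--         if i in remaining:
--             remaining[i] -= 1
--     return all(v <= 0 for v in remaining.values())
-- ===== Notes on version B (the rewrite author's own statement) =====
-- stated objective: alternative
-- what changed: B consumes each ballot in newLc against a dict of the outstanding positive demands and finally checks every demand was driven to zero, instead of A's building a full frequency table of newLc and comparing each demand against it with early returns.
import Mathlib
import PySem

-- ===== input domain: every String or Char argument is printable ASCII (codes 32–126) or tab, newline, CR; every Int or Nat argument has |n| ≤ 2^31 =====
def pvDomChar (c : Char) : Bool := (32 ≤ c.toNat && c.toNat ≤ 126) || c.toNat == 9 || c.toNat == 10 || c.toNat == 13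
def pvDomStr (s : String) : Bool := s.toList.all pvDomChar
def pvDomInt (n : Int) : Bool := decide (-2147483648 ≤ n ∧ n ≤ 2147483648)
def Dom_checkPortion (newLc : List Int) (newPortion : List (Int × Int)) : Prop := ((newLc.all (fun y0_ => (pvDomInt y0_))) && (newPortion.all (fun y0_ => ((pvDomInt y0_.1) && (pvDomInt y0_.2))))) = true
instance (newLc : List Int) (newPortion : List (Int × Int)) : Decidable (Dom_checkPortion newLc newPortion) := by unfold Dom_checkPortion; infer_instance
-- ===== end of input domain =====

-- B consumes each ballot against a dict of the outstanding positive demands instead of building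
-- a frequency table of newLc and comparing each demand against it (alternative decomposition).

-- ===== PORT A =====
def checkPortionLoopA (lcfreq : PySem.Dict Int Int) (pd : PySem.Dict Int Int) : List Int → Bool
  | [] => true
  | i :: rest =>
    if pd.getD i 0 > 0 then
      if lcfreq.contains i = false then false
      else if pd.getD i 0 > lcfreq.getD i 0 then false
      else checkPortionLoopA lcfreq pd rest
    else checkPortionLoopA lcfreq pd rest

def checkPortion (newLc : List Int) (newPortion : List (Int × Int)) : Bool :=
  let lcfreq := newLc.foldl (fun d i => (d.setdefault i 0).modify i 0 (· + 1)) PySem.Dict.empty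
  let pd : PySem.Dict Int Int := PySem.Dict.mk newPortion
  checkPortionLoopA lcfreq pd pd.keys

-- ===== PORT B =====
def checkPortion_alt (newLc : List Int) (newPortion : List (Int × Int)) : Bool :=
  let remaining : PySem.Dict Int Int := PySem.Dict.mk (newPortion.filter (fun p => p.2 > 0))
  let final := newLc.foldl (fun d i => if d.contains i then d.modify i 0 (· - 1) else d) remaining
  final.values.all (fun v => v ≤ 0)

-- ===== PRECONDITION & SPEC =====
-- newPortion represents a Python dict, whose keys are necessarily distinct; association lists
-- with duplicate keys correspond to no dict input, so Pre_ excludes nothing A accepts.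
def Pre_checkPortion (newLc : List Int) (newPortion : List (Int × Int)) : Prop :=
  (newPortion.map Prod.fst).Nodup
instance (newLc : List Int) (newPortion : List (Int × Int)) : Decidable (Pre_checkPortion newLc newPortion) := by unfold Pre_checkPortion; infer_instance
def pvWitness_checkPortion : List Int × (List (Int × Int)) := ([1, 2, 1], [(1, 2), (3, 0)])

def Spec_checkPortion (newLc : List Int) (newPortion : List (Int × Int)) (out : Bool) : Prop := out = checkPortion_alt newLc newPortion
instance (newLc : List Int) (newPortion : List (Int × Int)) (out : Bool) : Decidable (Spec_checkPortion newLc newPortion out) := by unfold Spec_checkPortion; infer_instance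

-- ===== CLAIM (what is proved, stated in full; the proofs are below) =====
def Claim_equal_checkPortion : Prop := ∀ (newLc : List Int) (newPortion : List (Int × Int)), Dom_checkPortion newLc newPortion → Pre_checkPortion newLc newPortion → Spec_checkPortion newLc newPortion (checkPortion newLc newPortion)

-- ===== LEMMAS AND PROOFS =====

theorem setdefault_modify (d : PySem.Dict Int Int) (i : Int) :
    (d.setdefault i 0).modify i 0 (· + 1) = d.modify i 0 (· + 1) := by
  by_cases h : d.contains i
  · simp [PySem.Dict.setdefault, h]
  · apply PySem.Dict.ext
    have h' : d.items.any (fun p => p.1 == i) = false := by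
      have : d.contains i = false := by simpa using h
      simpa [PySem.Dict.contains] using this
    have hf : d.items.find? (fun p => p.1 == i) = none := by
      rw [List.find?_eq_none]
      intro p hp
      simpa using List.any_eq_false.mp h' p hp
    simp [PySem.Dict.setdefault, PySem.Dict.modify, PySem.Dict.insert,
      PySem.Dict.contains, PySem.Dict.getD, PySem.Dict.get?, List.find?_append, hf,
      List.any_append, h', List.map_append]
    have hc : ∀ p ∈ d.items, (if p.1 = i then ((i : Int), (1 : Int)) else p) = p := by
      intro p hp
      have := List.any_eq_false.mp h' p hp
      simp at this
      simp [this]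
    simp [List.map_congr_left hc]

theorem lcfreq_eq_counter (newLc : List Int) :
    newLc.foldl (fun d i => (d.setdefault i 0).modify i 0 (· + 1)) PySem.Dict.empty
      = PySem.Dict.counter newLc := by
  rw [PySem.Dict.counter_eq_foldl]
  exact PySem.List.foldl_congr_mem _ _ _ _ (fun d i _ => setdefault_modify d i)

theorem loopA_eq_all (lc pd : PySem.Dict Int Int) (ks : List Int) :
    checkPortionLoopA lc pd ks
      = ks.all (fun i => !(pd.getD i 0 > 0) || (lc.contains i && !(pd.getD i 0 > lc.getD i 0))) := by
  induction ks with
  | nil => rfl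
  | cons i rest ih =>
    simp only [checkPortionLoopA, List.all_cons]
    by_cases h1 : pd.getD i 0 > 0
    · by_cases h2 : lc.contains i = false
      · simp [h1, h2]
      · by_cases h3 : pd.getD i 0 > lc.getD i 0 <;> simp [h1, h2, h3, ih] at * <;> simp_all
    · simp [h1, ih]

theorem consume_keyslist (l : List Int) (d : PySem.Dict Int Int) :
    (l.foldl (fun d i => if d.contains i then d.modify i 0 (· - 1) else d) d).keys = d.keys := by
  induction l generalizing d with
  | nil => rfl
  | cons i rest ih =>
    simp only [List.foldl_cons]
    by_cases h : d.contains i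
    · rw [if_pos h, ih, PySem.Dict.keys_modify, PySem.Dict.keys_insert_of_contains _ _ h]
    · rw [if_neg h, ih]

theorem consume_getD (l : List Int) (d : PySem.Dict Int Int) (k : Int)
    (hk : d.contains k = true) :
    (l.foldl (fun d i => if d.contains i then d.modify i 0 (· - 1) else d) d).getD k 0
      = d.getD k 0 - l.count k := by
  induction l generalizing d with
  | nil => simp
  | cons i rest ih =>
    simp only [List.foldl_cons, List.count_cons]
    by_cases h : d.contains i
    · rw [if_pos h, ih _ (by rw [PySem.Dict.contains_modify]; simpa using Or.inr hk), PySem.Dict.getD_modify]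
      by_cases hki : k = i
      · simp [hki]
        push_cast
        ring
      · have : (i == k) = false := by simpa using Ne.symm hki
        simp [hki, this]
    · rw [if_neg h, ih _ hk]
      have hki : ¬ (i = k) := fun e => h (e ▸ hk)
      have : (i == k) = false := by simpa using hki
      simp [this]

theorem all_congr_mem {a : Type} (l : List a) (p q : a → Bool) (h : ∀ x ∈ l, p x = q x) :
    l.all p = l.all q := by
  induction l with
  | nil => rfl
  | cons x t ih =>
    simp only [List.all_cons, h x (by simp)]
    rw [ih (fun b hb => h b (by simp [hb]))]

theorem checkPortion_main (newLc : List Int) (newPortion : List (Int × Int))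
    (hpre : (newPortion.map Prod.fst).Nodup) :
    checkPortion newLc newPortion = checkPortion_alt newLc newPortion := by
  simp only [checkPortion, checkPortion_alt, lcfreq_eq_counter, loopA_eq_all]
  have hknodup : (PySem.Dict.mk newPortion).keys.Nodup := by
    simpa [PySem.Dict.keys] using hpre
  have hrnodup : (PySem.Dict.mk (newPortion.filter (fun p => p.2 > 0))).keys.Nodup := by
    simp only [PySem.Dict.keys]
    exact List.Nodup.sublist (List.Sublist.map _ List.filter_sublist) (by simpa using hpre)
  rw [PySem.Dict.values_eq_map_keys _ (by rw [consume_keyslist]; exact hrnodup) 0,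
      consume_keyslist]
  simp only [PySem.Dict.keys, List.all_map]
  rw [List.all_filter]
  apply all_congr_mem
  intro p hp
  simp only [Function.comp]
  have hpd : (PySem.Dict.mk newPortion).getD p.1 0 = p.2 :=
    PySem.Dict.getD_of_mem_items _ hp hknodup 0
  rw [hpd, PySem.Dict.getD_counter, PySem.Dict.contains_counter]
  by_cases hpos : p.2 > 0
  · have hpf : p ∈ newPortion.filter (fun p => p.2 > 0) :=
      List.mem_filter.mpr ⟨hp, by simpa using hpos⟩
    have hrc : (PySem.Dict.mk (newPortion.filter (fun p => p.2 > 0))).contains p.1 = true := by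
      rw [PySem.Dict.contains_iff_mem_keys, PySem.Dict.keys_mk]
      exact List.mem_map_of_mem hpf
    have hrget : (PySem.Dict.mk (newPortion.filter (fun p => p.2 > 0))).getD p.1 0 = p.2 :=
      PySem.Dict.getD_of_mem_items _ hpf hrnodup 0
    simp only [consume_getD _ _ _ hrc, hrget]
    by_cases hle : p.2 ≤ (newLc.count p.1 : Int)
    · have hcnt : 0 < newLc.count p.1 := by omega
      have hmem : p.1 ∈ newLc := List.count_pos_iff.mp hcnt
      have hc : newLc.contains p.1 = true := by simpa using hmem
      have h3 : p.2 - (newLc.count p.1 : Int) ≤ 0 := by omega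
      have h4 : ¬ (p.2 > (newLc.count p.1 : Int)) := by omega
      simp [hpos, h3, h4]
      exact hmem
    · have h1 : ¬ (p.2 - (newLc.count p.1 : Int) ≤ 0) := by omega
      have h2 : p.2 > (newLc.count p.1 : Int) := by omega
      simp [hpos, h1, h2]
  · simp [hpos]

-- ===== VERDICT (by name: the statement is the Claim_ definition above) =====
theorem checkPortion_spec : Claim_equal_checkPortion := by
  intro newLc newPortion _ hpre
  exact checkPortion_main newLc newPortion hpre
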